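-- pv_equiv track=rewrite | github.com/jon-gauntlet/aether | src/core/scripts/python/qpRc.py | _map_category
-- ===== SOURCE A (Python) =====
-- from typing import Any, Dict, List, Optional
--
-- def _map_category(warning: Dict[str, Any]) -> str:
--     """Map Brakeman warning to security category.
--
--     Args:
--         warning: Brakeman warning dictionary
--
--     Returns:
--         Normalized security category
--     """
--     warning_type = warning.get('warning_type', '').lower()
--     check_name = warning.get('check_name', '').lower()
--
--     if any(x in warning_type or x in check_name for x in ['sql', 'command', 'injection', 'execute']):
--         return '6. Injection'
--     elif 'xss' in warning_type or 'cross site scripting' in warning_type: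
--         return '7. XSS'
--     elif any(x in warning_type or x in check_name for x in ['csrf', 'forgery']):
--         return '4. CSRF'
--     elif any(x in warning_type or x in check_name for x in ['session', 'cookie']):
--         return '3. Session Management'
--     elif any(x in warning_type or x in check_name for x in ['auth', 'password']):
--         return '2. Authentication'
--     elif any(x in warning_type or x in check_name for x in ['mass assignment', 'permit', 'attribute']):
--         return '1. Access Control'
--     elif any(x in warning_type or x in check_name for x in ['validation', 'sanitize']):
--         return '7. Input Validation'
--     elif any(x in warning_type or x in check_name for x in ['disclosure', 'information', 'fingerprint']):
--         return '5. Information Disclosure'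
--
--     return '10. Other'
-- ===== SOURCE B (Python) =====
-- # Aggregate re-implementation: collect the ranks of ALL matching keywords from a
-- # flat keyword table, then index a category array by the minimum matched rank.
-- _KEYWORDS = [
--     ('sql', 0, True), ('command', 0, True), ('injection', 0, True), ('execute', 0, True),
--     ('xss', 1, False), ('cross site scripting', 1, False),
--     ('csrf', 2, True), ('forgery', 2, True),
--     ('session', 3, True), ('cookie', 3, True),
--     ('auth', 4, True), ('password', 4, True),
--     ('mass assignment', 5, True), ('permit', 5, True), ('attribute', 5, True),
--     ('validation', 6, True), ('sanitize', 6, True),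
--     ('disclosure', 7, True), ('information', 7, True), ('fingerprint', 7, True),
-- ]
--
-- _CATEGORIES = [
--     '6. Injection', '7. XSS', '4. CSRF', '3. Session Management',
--     '2. Authentication', '1. Access Control', '7. Input Validation',
--     '5. Information Disclosure',
-- ]
--
-- def _map_category(warning):
--     warning_type = warning.get('warning_type', '').lower()
--     check_name = warning.get('check_name', '').lower()
--     ranks = [r for kw, r, both in _KEYWORDS
--              if kw in warning_type or (both and kw in check_name)]
--     return _CATEGORIES[min(ranks)] if ranks else '10. Other'
-- ===== Notes on version B (the rewrite author's own statement) =====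
-- stated objective: alternative
-- what changed: Instead of an if/elif chain of any() tests evaluated with short-circuiting, B collects the ranks of ALL matching keywords from one flat keyword table in a single comprehension and indexes a category array by the minimum matched rank (min-aggregation instead of first-match branching); correctness rests on the table's ranks being listed in the chain's priority order, so the minimum matched rank is the first chain branch that would fire.
import Mathlib
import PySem

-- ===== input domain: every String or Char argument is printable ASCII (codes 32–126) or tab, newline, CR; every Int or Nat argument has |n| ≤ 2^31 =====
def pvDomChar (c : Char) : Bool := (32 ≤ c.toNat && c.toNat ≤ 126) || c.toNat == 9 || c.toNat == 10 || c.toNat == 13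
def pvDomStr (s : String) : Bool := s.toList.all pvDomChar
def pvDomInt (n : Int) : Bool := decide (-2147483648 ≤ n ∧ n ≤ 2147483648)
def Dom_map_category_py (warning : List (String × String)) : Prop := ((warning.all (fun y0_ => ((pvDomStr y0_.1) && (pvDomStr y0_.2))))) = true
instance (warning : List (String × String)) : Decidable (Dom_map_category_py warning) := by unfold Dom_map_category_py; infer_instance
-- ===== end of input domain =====

-- B replaces A's if/elif chain by aggregating the ranks of ALL matching keywords from a flat table and indexing a category array by the minimum rank (objective: alternative).


-- ===== PORT A =====
-- warning.get(k, '') on the assoc-list dict: first matching key, else ''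
def pyDictGetA (warning : List (String × String)) (k : String) : String :=
  (((warning.find? (fun p => p.1 == k)).map (·.2)).getD "")

-- the if/elif chain of A over the two lowered fields
def pvChainA (warning_type check_name : String) : String :=
  if (["sql", "command", "injection", "execute"] : List String).any
      (fun x => PySem.Str.isIn x warning_type || PySem.Str.isIn x check_name) then
    "6. Injection"
  else if PySem.Str.isIn "xss" warning_type || PySem.Str.isIn "cross site scripting" warning_type then
    "7. XSS"
  else if (["csrf", "forgery"] : List String).any
      (fun x => PySem.Str.isIn x warning_type || PySem.Str.isIn x check_name) then
    "4. CSRF"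
  else if (["session", "cookie"] : List String).any
      (fun x => PySem.Str.isIn x warning_type || PySem.Str.isIn x check_name) then
    "3. Session Management"
  else if (["auth", "password"] : List String).any
      (fun x => PySem.Str.isIn x warning_type || PySem.Str.isIn x check_name) then
    "2. Authentication"
  else if (["mass assignment", "permit", "attribute"] : List String).any
      (fun x => PySem.Str.isIn x warning_type || PySem.Str.isIn x check_name) then
    "1. Access Control"
  else if (["validation", "sanitize"] : List String).any
      (fun x => PySem.Str.isIn x warning_type || PySem.Str.isIn x check_name) then
    "7. Input Validation"
  else if (["disclosure", "information", "fingerprint"] : List String).any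
      (fun x => PySem.Str.isIn x warning_type || PySem.Str.isIn x check_name) then
    "5. Information Disclosure"
  else
    "10. Other"

def map_category_py (warning : List (String × String)) : String :=
  pvChainA (PySem.Str.lower (pyDictGetA warning "warning_type"))
    (PySem.Str.lower (pyDictGetA warning "check_name"))

-- ===== PORT B =====
-- flat keyword table: (keyword, rank, search-check_name flag)
def pvKeywordsB : List (String × Nat × Bool) :=
  [ ("sql", 0, true), ("command", 0, true), ("injection", 0, true), ("execute", 0, true),
    ("xss", 1, false), ("cross site scripting", 1, false),
    ("csrf", 2, true), ("forgery", 2, true),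
    ("session", 3, true), ("cookie", 3, true),
    ("auth", 4, true), ("password", 4, true),
    ("mass assignment", 5, true), ("permit", 5, true), ("attribute", 5, true),
    ("validation", 6, true), ("sanitize", 6, true),
    ("disclosure", 7, true), ("information", 7, true), ("fingerprint", 7, true) ]

-- rank → category name
def pvCategoriesB : List String :=
  [ "6. Injection", "7. XSS", "4. CSRF", "3. Session Management",
    "2. Authentication", "1. Access Control", "7. Input Validation",
    "5. Information Disclosure" ]

-- ranks = [r for kw, r, both in _KEYWORDS if kw in warning_type or (both and kw in check_name)]
def pvAggB (warning_type check_name : String) : String :=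
  let ranks := (pvKeywordsB.filter (fun e =>
      PySem.Str.isIn e.1 warning_type || (e.2.2 && PySem.Str.isIn e.1 check_name))).map (fun e => e.2.1)
  -- return _CATEGORIES[min(ranks)] if ranks else '10. Other'
  -- (the .getD defaults are unreachable: min? of a nonempty list is some, and every rank is < 8)
  match ranks with
  | [] => "10. Other"
  | r :: rs =>
    (PySem.List.pyGet? pvCategoriesB (((PySem.List.min? (r :: rs) (fun x => x)).getD r : Nat) : Int)).getD ""

def map_category_py_alt (warning : List (String × String)) : String :=
  pvAggB (PySem.Str.lower (((warning.find? (fun p => p.1 == "warning_type")).map (·.2)).getD ""))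
    (PySem.Str.lower (((warning.find? (fun p => p.1 == "check_name")).map (·.2)).getD ""))

-- ===== PRECONDITION & SPEC =====
def Spec_map_category_py (warning : List (String × String)) (out : String) : Prop := out = map_category_py_alt warning
instance (warning : List (String × String)) (out : String) : Decidable (Spec_map_category_py warning out) := by unfold Spec_map_category_py; infer_instance

-- ===== CLAIM (what is proved, stated in full; the proofs are below) =====
def Claim_equal_map_category_py : Prop := ∀ (warning : List (String × String)), Dom_map_category_py warning → Spec_map_category_py warning (map_category_py warning)

-- ===== LEMMAS AND PROOFS =====

lemma pv_ite_orb {α : Type} (a b : Bool) (x y : α) :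
    (if a then x else if b then x else y) = if (a || b) then x else y := by
  cases a <;> simp

lemma pv_find?_cons_ite {α : Type} (p : α → Bool) (a : α) (l : List α) :
    List.find? p (a :: l) = if p a then some a else List.find? p l := by
  by_cases h : p a <;> simp [h]

lemma pv_find?_eq_head?_filter {α : Type} (p : α → Bool) (l : List α) :
    List.find? p l = (l.filter p).head? := by
  induction l with
  | nil => rfl
  | cons a t ih =>
    rw [pv_find?_cons_ite, List.filter_cons]
    by_cases h : p a
    · simp only [h, if_true, List.head?_cons]
    · simp only [h, Bool.false_eq_true, if_false, ih]

lemma pv_foldl_min (r : Nat) (rs : List Nat) (h : ∀ x ∈ rs, r ≤ x) : rs.foldl min r = r := by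
  induction rs generalizing r with
  | nil => rfl
  | cons a t ih =>
    simp only [List.foldl_cons]
    rw [Nat.min_eq_left (h a (by simp))]
    exact ih r (fun x hx => h x (by simp [hx]))

-- the continuation applied to the first matching entry
def pvFin (o : Option (String × Nat × Bool)) : String :=
  match o with
  | some e => (PySem.List.pyGet? pvCategoriesB ((e.2.1 : Nat) : Int)).getD ""
  | none => "10. Other"

lemma pv_alt_eq_fin (wt cn : String) :
    pvAggB wt cn
    = pvFin (pvKeywordsB.find? (fun e =>
        PySem.Str.isIn e.1 wt || (e.2.2 && PySem.Str.isIn e.1 cn))) := by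
  unfold pvAggB
  rw [pv_find?_eq_head?_filter]
  have hpw : (pvKeywordsB.filter (fun e =>
      PySem.Str.isIn e.1 wt || (e.2.2 && PySem.Str.isIn e.1 cn))).Pairwise
      (fun a b => a.2.1 ≤ b.2.1) :=
    List.Pairwise.filter _ (by decide)
  generalize hf : pvKeywordsB.filter (fun e =>
      PySem.Str.isIn e.1 wt || (e.2.2 && PySem.Str.isIn e.1 cn)) = fl at hpw ⊢
  cases fl with
  | nil => simp [pvFin]
  | cons e es =>
    have hmono : ∀ x ∈ es.map (fun e => e.2.1), e.2.1 ≤ x := by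
      intro x hx
      rcases List.mem_map.mp hx with ⟨b, hb, rfl⟩
      exact (List.pairwise_cons.mp hpw).1 b hb
    simp only [List.map_cons, List.head?_cons, pvFin, PySem.List.min?_id_cons,
      Option.getD_some]
    rw [pv_foldl_min _ _ hmono]

lemma pv_fin_eq_chain (wt cn : String) :
    pvFin (pvKeywordsB.find? (fun e =>
        PySem.Str.isIn e.1 wt || (e.2.2 && PySem.Str.isIn e.1 cn)))
    = pvChainA wt cn := by
  have hx :
    (if (["sql", "command", "injection", "execute"] : List String).any
        (fun x => PySem.Str.isIn x wt || PySem.Str.isIn x cn) then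
      "6. Injection"
    else if PySem.Str.isIn "xss" wt || PySem.Str.isIn "cross site scripting" wt then
      "7. XSS"
    else if (["csrf", "forgery"] : List String).any
        (fun x => PySem.Str.isIn x wt || PySem.Str.isIn x cn) then
      "4. CSRF"
    else if (["session", "cookie"] : List String).any
        (fun x => PySem.Str.isIn x wt || PySem.Str.isIn x cn) then
      "3. Session Management"
    else if (["auth", "password"] : List String).any
        (fun x => PySem.Str.isIn x wt || PySem.Str.isIn x cn) then
      "2. Authentication"
    else if (["mass assignment", "permit", "attribute"] : List String).any
        (fun x => PySem.Str.isIn x wt || PySem.Str.isIn x cn) then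
      "1. Access Control"
    else if (["validation", "sanitize"] : List String).any
        (fun x => PySem.Str.isIn x wt || PySem.Str.isIn x cn) then
      "7. Input Validation"
    else if (["disclosure", "information", "fingerprint"] : List String).any
        (fun x => PySem.Str.isIn x wt || PySem.Str.isIn x cn) then
      "5. Information Disclosure"
    else
      "10. Other") = pvChainA wt cn := by unfold pvChainA; rfl
  rw [← hx]
  have h0 : ∀ kw both, pvFin (some (kw, 0, both)) = "6. Injection" := fun _ _ => rfl
  have h1 : ∀ kw both, pvFin (some (kw, 1, both)) = "7. XSS" := fun _ _ => rfl
  have h2 : ∀ kw both, pvFin (some (kw, 2, both)) = "4. CSRF" := fun _ _ => rfl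
  have h3 : ∀ kw both, pvFin (some (kw, 3, both)) = "3. Session Management" := fun _ _ => rfl
  have h4 : ∀ kw both, pvFin (some (kw, 4, both)) = "2. Authentication" := fun _ _ => rfl
  have h5 : ∀ kw both, pvFin (some (kw, 5, both)) = "1. Access Control" := fun _ _ => rfl
  have h6 : ∀ kw both, pvFin (some (kw, 6, both)) = "7. Input Validation" := fun _ _ => rfl
  have h7 : ∀ kw both, pvFin (some (kw, 7, both)) = "5. Information Disclosure" := fun _ _ => rfl
  have hn : pvFin none = "10. Other" := rfl
  simp only [pvKeywordsB, pv_find?_cons_ite, List.find?_nil, apply_ite pvFin,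
    h0, h1, h2, h3, h4, h5, h6, h7, hn,
    Bool.true_and, Bool.false_and, Bool.or_false,
    List.any_cons, List.any_nil, pv_ite_orb]

-- ===== VERDICT (by name: the statement is the Claim_ definition above) =====
theorem map_category_py_spec : Claim_equal_map_category_py := by
  intro warning _
  show map_category_py warning = map_category_py_alt warning
  unfold map_category_py map_category_py_alt pyDictGetA
  exact (pv_fin_eq_chain _ _).symm.trans (pv_alt_eq_fin _ _).symm
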